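-- pv_equiv track=rewrite | github.com/Karuso1/QuantumOX | utils.py | coords_to_index
-- ===== SOURCE A (Python) =====
-- from typing import List, Tuple, Optional, Iterable
--
-- def coords_to_index(coords: Iterable[int], dims: Tuple[int, ...]) -> int:
--     """Convert coordinates (zero-based) to 1-based linear index.
--
--     Example: (0,0) on a 3x3 -> 1, (1,1) -> 5
--     """
--     coords = tuple(coords)
--     if len(coords) != len(dims):
--         raise ValueError("coords length must match dims length")
--     idx = 0
--     for c, size in zip(coords, dims):
--         if c < 0 or c >= size:
--             raise ValueError("coordinate out of range")
--         idx = idx * size + c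
--     return idx + 1
-- ===== SOURCE B (Python) =====
-- def coords_to_index(coords, dims):
--     """Convert coordinates (zero-based) to 1-based linear index.
--
--     Recursive variant: recurse on the suffix, returning (offset, blocksize)
--     for the remaining dimensions; no explicit loop or accumulator.
--     """
--     coords = tuple(coords)
--     dims = tuple(dims)
--     if len(coords) != len(dims):
--         raise ValueError("coords length must match dims length")
--
--     def go(i):
--         # (offset within block, block size) for coords[i:], dims[i:]
--         if i == len(coords):
--             return (0, 1)
--         off, blk = go(i + 1)
--         c, size = coords[i], dims[i]
--         if c < 0 or c >= size:
--             raise ValueError("coordinate out of range")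
--         return (c * blk + off, blk * size)
--
--     return go(0)[0] + 1
-- ===== Notes on version B (the rewrite author's own statement) =====
-- stated objective: alternative
-- what changed: Replaces A's forward Horner accumulation loop (idx = idx*size + c) by a right-to-left structural recursion that returns an (offset, blocksize) pair per suffix and combines them as c*blocksize + offset, with no loop or mutable accumulator.
import Mathlib
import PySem

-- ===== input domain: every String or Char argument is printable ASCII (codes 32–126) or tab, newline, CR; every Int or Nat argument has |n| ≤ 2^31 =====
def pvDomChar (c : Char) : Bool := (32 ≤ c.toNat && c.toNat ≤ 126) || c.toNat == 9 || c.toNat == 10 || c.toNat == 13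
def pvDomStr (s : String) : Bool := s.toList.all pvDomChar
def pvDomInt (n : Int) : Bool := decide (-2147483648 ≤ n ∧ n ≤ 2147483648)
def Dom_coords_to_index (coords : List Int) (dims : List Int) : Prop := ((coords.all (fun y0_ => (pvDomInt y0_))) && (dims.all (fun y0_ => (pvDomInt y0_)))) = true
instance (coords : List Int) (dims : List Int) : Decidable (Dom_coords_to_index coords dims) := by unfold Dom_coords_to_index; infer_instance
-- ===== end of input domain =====

-- B replaces A's forward Horner loop by a right-to-left structural recursion returning (offset, blocksize) pairs (alternative decomposition, same cost).


-- ===== PORT A =====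
-- Horner loop over zip(coords, dims): none = ValueError "coordinate out of range"
def pvLoopA : List (Int × Int) → Int → Option Int
  | [], idx => some idx
  | (c, size) :: rest, idx =>
      if c < 0 ∨ size ≤ c then none else pvLoopA rest (idx * size + c)

def coords_to_index (coords : List Int) (dims : List Int) : Int :=
  if coords.length ≠ dims.length then 0   -- ValueError "coords length must match dims length" (excluded by Pre_)
  else match pvLoopA (coords.zip dims) 0 with
       | some idx => idx + 1
       | none => 0                         -- ValueError (excluded by Pre_)

-- ===== PORT B =====
-- go: right-to-left recursion; some (offset, blocksize) for the suffix, none = ValueError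
def pvGo : List Int → List Int → Option (Int × Int)
  | [], [] => some (0, 1)
  | c :: cs, d :: ds =>
      match pvGo cs ds with
      | none => none
      | some (off, blk) =>
          if c < 0 ∨ d ≤ c then none else some (c * blk + off, blk * d)
  | _, _ => none

def coords_to_index_alt (coords : List Int) (dims : List Int) : Int :=
  if coords.length ≠ dims.length then 0   -- ValueError (excluded by Pre_)
  else match pvGo coords dims with
       | some (off, _) => off + 1
       | none => 0                         -- ValueError (excluded by Pre_)

-- ===== PRECONDITION & SPEC =====
-- Pre_ excludes exactly the inputs on which A raises ValueError: length mismatch or a coordinate outside [0, size).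
def Pre_coords_to_index (coords : List Int) (dims : List Int) : Prop :=
  coords.length = dims.length ∧ ∀ p ∈ coords.zip dims, 0 ≤ p.1 ∧ p.1 < p.2
instance (coords : List Int) (dims : List Int) : Decidable (Pre_coords_to_index coords dims) := by unfold Pre_coords_to_index; infer_instance
def pvWitness_coords_to_index : List Int × List Int := ([1, 1], [3, 3])
def Spec_coords_to_index (coords : List Int) (dims : List Int) (out : Int) : Prop := out = coords_to_index_alt coords dims
instance (coords : List Int) (dims : List Int) (out : Int) : Decidable (Spec_coords_to_index coords dims out) := by unfold Spec_coords_to_index; infer_instance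

-- ===== CLAIM (what is proved, stated in full; the proofs are below) =====
def Claim_equal_coords_to_index : Prop := ∀ (coords : List Int) (dims : List Int), Dom_coords_to_index coords dims → Pre_coords_to_index coords dims → Spec_coords_to_index coords dims (coords_to_index coords dims)

-- ===== LEMMAS AND PROOFS =====

-- weighted sum: pvW cs ds = Σ cᵢ * (product of dims after position i)
def pvW : List Int → List Int → Int
  | c :: cs, d :: ds => c * ds.prod + pvW cs ds
  | _, _ => 0

lemma pvLoopA_eq (cs ds : List Int) (idx : Int)
    (hlen : cs.length = ds.length)
    (hin : ∀ p ∈ cs.zip ds, 0 ≤ p.1 ∧ p.1 < p.2) :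
    pvLoopA (cs.zip ds) idx = some (idx * ds.prod + pvW cs ds) := by
  induction cs generalizing ds idx with
  | nil =>
      cases ds with
      | nil => simp [pvLoopA, pvW]
      | cons d ds => simp at hlen
  | cons c cs ih =>
      cases ds with
      | nil => simp at hlen
      | cons d ds =>
          have hc := hin (c, d) (by simp)
          simp only [List.zip_cons_cons, pvLoopA]
          rw [if_neg (by push Not; omega)]
          rw [ih ds _ (by simpa using hlen) (fun p hp => hin p (by simp [hp]))]
          simp [pvW, List.prod_cons]; ring

lemma pvGo_eq (cs ds : List Int)
    (hlen : cs.length = ds.length)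
    (hin : ∀ p ∈ cs.zip ds, 0 ≤ p.1 ∧ p.1 < p.2) :
    pvGo cs ds = some (pvW cs ds, ds.prod) := by
  induction cs generalizing ds with
  | nil =>
      cases ds with
      | nil => simp [pvGo, pvW]
      | cons d ds => simp at hlen
  | cons c cs ih =>
      cases ds with
      | nil => simp at hlen
      | cons d ds =>
          have hc := hin (c, d) (by simp)
          simp only [pvGo]
          rw [ih ds (by simpa using hlen) (fun p hp => hin p (by simp [hp]))]
          have h1 : ¬(c < 0 ∨ d ≤ c) := by simp at hc; omega
          simp [h1, pvW, List.prod_cons]; ring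

-- ===== VERDICT (by name: the statement is the Claim_ definition above) =====
theorem coords_to_index_spec : Claim_equal_coords_to_index := by
  intro coords dims _ hpre
  obtain ⟨hlen, hin⟩ := hpre
  unfold Spec_coords_to_index coords_to_index coords_to_index_alt
  rw [if_neg (by omega), if_neg (by omega)]
  rw [pvLoopA_eq coords dims 0 hlen hin, pvGo_eq coords dims hlen hin]
  simp
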